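-- pv_equiv track=rewrite | github.com/Dragooz/LeetCode_Solutions | Biweekly Contest 66/2086. Minimum Number of Buckets Required to Collect Rainwater from Houses.py | minimumBuckets
-- ===== SOURCE A (Python) =====
-- def minimumBuckets(street: str) -> int:
--
--     street = [0 if i=='.' else -1 for i in street]
--
--     if len(street) == 1:
--         return 0 if street[0] == 0 else -1
--
--     for i in range(len(street)):
--         if street[i] == -1: #house
--
--             if i == 0:
--                 if street[i+1] == -1:
--                     return -1
--                 else:
--                     street[i+1] = 1
--                     continue
--
--             if i == len(street)-1:
--                 if street[i-1] == -1:
--                     return -1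
--                 else:
--                     street[i-1] = 1
--                     continue
--
--             if street[i-1]==1 or street[i+1] == 1:
--                 continue
--             elif street[i+1] == -1:
--                 if street[i-1] == -1:
--                     return -1
--                 else:
--                     street[i-1] = 1
--             else:
--                 street[i+1] = 1
--
--     return sum([i if i>0 else 0 for i in street])
-- ===== SOURCE B (Python) =====
-- def minimumBuckets(street: str) -> int:
--     # Single forward scan with index jumps: placing a right bucket covers
--     # positions i, i+1, i+2, so skip straight to i+3; no array, no final sum.
--     n = len(street)
--     count = 0
--     i = 0
--     while i < n:
--         if street[i] == '.':
--             i += 1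
--         elif i + 1 < n and street[i + 1] == '.':
--             count += 1
--             i += 3
--         elif i - 1 >= 0 and street[i - 1] == '.':
--             count += 1
--             i += 1
--         else:
--             return -1
--     return count
-- ===== Notes on version B (the rewrite author's own statement) =====
-- stated objective: faster
-- what changed: Replaces A's mutable 0/-1/1 array, per-house neighbour bookkeeping and final summation pass by a single forward index scan that jumps to i+3 after placing a right bucket and keeps only an integer counter (no list allocation, no second pass).
import Mathlib
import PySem

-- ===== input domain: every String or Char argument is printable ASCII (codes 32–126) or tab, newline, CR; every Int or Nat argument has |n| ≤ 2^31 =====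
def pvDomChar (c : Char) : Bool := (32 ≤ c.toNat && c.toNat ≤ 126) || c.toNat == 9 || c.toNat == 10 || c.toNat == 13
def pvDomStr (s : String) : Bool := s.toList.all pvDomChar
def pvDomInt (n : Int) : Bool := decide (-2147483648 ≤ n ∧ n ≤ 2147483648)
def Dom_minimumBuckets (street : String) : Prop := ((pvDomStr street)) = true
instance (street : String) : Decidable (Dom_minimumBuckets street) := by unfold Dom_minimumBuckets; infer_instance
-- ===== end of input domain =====

-- B replaces A's mutable 0/-1/1 array and final summation pass by a single
-- forward scan with index jumps (a right bucket covers i..i+2, so jump to i+3)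
-- maintaining only an integer counter; same greedy, no array, no second pass.


-- ===== PORT A =====
-- street = [0 if i=='.' else -1 for i in street]
def pvInit (s : List Char) : List Int := s.map (fun c => if c = '.' then (0 : Int) else -1)

-- return sum([i if i>0 else 0 for i in street])
def pvSumPos (st : List Int) : Int := (st.map (fun x => if x > 0 then x else 0)).sum

-- the for-loop of A, one fuel unit per iteration (called with fuel =
-- st.length, so fuel never runs out while i < st.length); every index A reads
-- is in range (guarded by the branch conditions and the peeled len==1 case),
-- so getD with default 0 is exact.
def pvALoop (st : List Int) (i : Nat) : Nat → Int
  | 0 => pvSumPos st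
  | fuel+1 =>
  if i < st.length then
    if st.getD i 0 = -1 then
      if i = 0 then
        if st.getD (i+1) 0 = -1 then -1
        else pvALoop (st.set (i+1) 1) (i+1) fuel
      else if i = st.length - 1 then
        if st.getD (i-1) 0 = -1 then -1
        else pvALoop (st.set (i-1) 1) (i+1) fuel
      else if st.getD (i-1) 0 = 1 ∨ st.getD (i+1) 0 = 1 then pvALoop st (i+1) fuel
      else if st.getD (i+1) 0 = -1 then
        if st.getD (i-1) 0 = -1 then -1
        else pvALoop (st.set (i-1) 1) (i+1) fuel
      else pvALoop (st.set (i+1) 1) (i+1) fuel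
    else pvALoop st (i+1) fuel
  else pvSumPos st

-- the len==1 special case before the loop, then the loop from index 0
def pvMain (st : List Int) : Int :=
  if st.length = 1 then (if st.getD 0 0 = 0 then 0 else -1)
  else pvALoop st 0 st.length

def minimumBuckets (street : String) : Int := pvMain (pvInit street.toList)

-- ===== PORT B =====
-- the while-loop of Source B, one fuel unit per iteration (i grows by ≥ 1 each
-- round, so fuel = s.length never runs out while i < s.length); every index
-- read is guarded, so getD with default ' ' is exact.
def pvBLoop (s : List Char) (i : Nat) (count : Int) : Nat → Int
  | 0 => count
  | fuel+1 =>
  if i < s.length then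
    if s.getD i ' ' = '.' then pvBLoop s (i+1) count fuel
    else if i + 1 < s.length ∧ s.getD (i+1) ' ' = '.' then pvBLoop s (i+3) (count+1) fuel
    else if 1 ≤ i ∧ s.getD (i-1) ' ' = '.' then pvBLoop s (i+1) (count+1) fuel
    else -1
  else count

def minimumBuckets_alt (street : String) : Int :=
  pvBLoop street.toList 0 0 street.toList.length

-- ===== PRECONDITION & SPEC =====
def Spec_minimumBuckets (street : String) (out : Int) : Prop := out = minimumBuckets_alt street
instance (street : String) (out : Int) : Decidable (Spec_minimumBuckets street out) := by unfold Spec_minimumBuckets; infer_instance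

-- ===== CLAIM (what is proved, stated in full; the proofs are below) =====
def Claim_equal_minimumBuckets : Prop := ∀ (street : String), Dom_minimumBuckets street → Spec_minimumBuckets street (minimumBuckets street)

-- ===== LEMMAS AND PROOFS =====

theorem pv_aloop_out (st : List Int) (i : Nat) (fa : Nat) (h : ¬ i < st.length) :
    pvALoop st i fa = pvSumPos st := by
  cases fa <;> simp [pvALoop, h]

theorem pv_bloop_out (s : List Char) (i : Nat) (c : Int) (fb : Nat) (h : ¬ i < s.length) :
    pvBLoop s i c fb = c := by
  cases fb <;> simp [pvBLoop, h]

theorem pv_getD_set (l : List Int) (i j : Nat) (a d : Int) :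
    (l.set i a).getD j d = if i = j ∧ i < l.length then a else l.getD j d := by
  simp only [List.getD_eq_getElem?_getD, List.getElem?_set]
  split <;> split <;> simp_all

theorem pv_getD_init (s : List Char) (j : Nat) (h : j < s.length) :
    (pvInit s).getD j 0 = if s.getD j ' ' = '.' then 0 else -1 := by
  simp [pvInit, List.getD_eq_getElem?_getD, List.getElem?_eq_getElem h]

theorem pv_sumPos_cons (a : Int) (t : List Int) :
    pvSumPos (a :: t) = (if a > 0 then a else 0) + pvSumPos t := by
  simp [pvSumPos]

theorem pv_sumPos_set (st : List Int) (m : Nat) (hm : m < st.length)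
    (h0 : st.getD m 0 = 0) : pvSumPos (st.set m 1) = pvSumPos st + 1 := by
  induction st generalizing m with
  | nil => simp at hm
  | cons a t ih =>
    cases m with
    | zero =>
      simp only [List.getD_eq_getElem?_getD] at h0
      simp at h0
      subst h0
      simp [pv_sumPos_cons]
      omega
    | succ m =>
      simp only [List.set_cons_succ, pv_sumPos_cons]
      rw [ih m (by simpa using hm) (by simpa [List.getD_eq_getElem?_getD] using h0)]
      omega

theorem pv_sumPos_init (s : List Char) : pvSumPos (pvInit s) = 0 := by
  induction s with
  | nil => simp [pvSumPos, pvInit]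
  | cons c t ih =>
    simp only [pvInit, List.map_cons] at *
    rw [pv_sumPos_cons, ih]
    split <;> simp_all

theorem pv_rightStep (s : List Char) (k : Nat)
    (ih : ∀ (i : Nat) (st : List Int) (fa fb : Nat), s.length - i ≤ k →
        s.length - i ≤ fa → s.length - i ≤ fb → s.length ≠ 1 → st.length = s.length →
        (∀ j, i ≤ j + 1 → j < st.length → st.getD j 0 = (pvInit s).getD j 0) →
        pvALoop st i fa = pvBLoop s i (pvSumPos st) fb)
    (i : Nat) (st : List Int) (fa fb : Nat)
    (hk : s.length - i ≤ k + 1)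
    (hfa : s.length - (i+1) ≤ fa) (hfb : s.length - (i+3) ≤ fb)
    (hn : s.length ≠ 1) (hlen : st.length = s.length)
    (hinv : ∀ j, i ≤ j + 1 → j < st.length → st.getD j 0 = (pvInit s).getD j 0)
    (hip : i + 1 < s.length) (_hdp : s.getD (i+1) ' ' = '.')
    (hp0 : st.getD (i+1) 0 = 0) :
    pvALoop (st.set (i+1) 1) (i+1) fa = pvBLoop s (i+3) (pvSumPos st + 1) fb := by
  have hget1 : (st.set (i+1) 1).getD (i+1) 0 = 1 := by
    rw [pv_getD_set]; simp; omega
  have hgetne : ∀ j, j ≠ i + 1 → (st.set (i+1) 1).getD j 0 = st.getD j 0 := by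
    intro j hj; rw [pv_getD_set, if_neg (fun h => hj h.1.symm)]
  have hsum : pvSumPos (st.set (i+1) 1) = pvSumPos st + 1 :=
    pv_sumPos_set st (i+1) (by omega) hp0
  obtain ⟨fa1, rfl⟩ : ∃ m, fa = m + 1 := ⟨fa - 1, by omega⟩
  rw [pvALoop, if_pos (by simp; omega : i + 1 < (st.set (i+1) 1).length)]
  rw [if_neg (by rw [hget1]; decide)]
  by_cases h2 : i + 2 < s.length
  · obtain ⟨fa2, rfl⟩ : ∃ m, fa1 = m + 1 := ⟨fa1 - 1, by omega⟩
    rw [pvALoop, if_pos (by simp; omega : i + 1 + 1 < (st.set (i+1) 1).length)]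
    have e2 : (st.set (i+1) 1).getD (i+1+1) 0 = (pvInit s).getD (i+2) 0 := by
      rw [hgetne (i+2) (by omega)]; exact hinv (i+2) (by omega) (by omega)
    rw [pv_getD_init s (i+2) h2] at e2
    by_cases hd2 : s.getD (i+2) ' ' = '.'
    · rw [if_neg (by rw [e2, if_pos hd2]; decide)]
      have hinv3 : ∀ j, i + 3 ≤ j + 1 → j < (st.set (i+1) 1).length → (st.set (i+1) 1).getD j 0 = (pvInit s).getD j 0 := by
        intro j hj hjl
        rw [hgetne j (by omega)]
        exact hinv j (by omega) (by simpa using hjl)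
      rw [show i + 1 + 1 + 1 = i + 3 from rfl,
          ih (i+3) (st.set (i+1) 1) fa2 fb (by omega) (by omega) (by omega) hn (by simp; omega) hinv3, hsum]
    · rw [if_pos (by rw [e2, if_neg hd2])]
      rw [if_neg (by omega : ¬ i + 1 + 1 = 0)]
      have hls : (st.set (i+1) 1).length = s.length := by simp [hlen]
      by_cases hl2 : i + 1 + 1 = (st.set (i+1) 1).length - 1
      · rw [if_pos hl2]
        rw [hls] at hl2
        rw [if_neg (by rw [show i + 1 + 1 - 1 = i + 1 by omega, hget1]; decide)]
        rw [show i + 1 + 1 - 1 = i + 1 by omega, List.set_set]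
        rw [pv_aloop_out _ _ _ (by rw [hls]; omega), pv_bloop_out _ _ _ _ (by omega), hsum]
      · rw [if_neg hl2]
        rw [if_pos (Or.inl (by rw [show i + 1 + 1 - 1 = i + 1 by omega, hget1]))]
        have hinv3 : ∀ j, i + 3 ≤ j + 1 → j < (st.set (i+1) 1).length → (st.set (i+1) 1).getD j 0 = (pvInit s).getD j 0 := by
          intro j hj hjl
          rw [hgetne j (by omega)]
          exact hinv j (by omega) (by simpa using hjl)
        rw [show i + 1 + 1 + 1 = i + 3 from rfl,
            ih (i+3) (st.set (i+1) 1) fa2 fb (by omega) (by omega) (by omega) hn (by simp; omega) hinv3, hsum]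
  · rw [pv_aloop_out _ _ _ (by simp; omega), pv_bloop_out _ _ _ _ (by omega), hsum]

theorem pv_loop_eq (s : List Char) : ∀ (k i : Nat) (st : List Int) (fa fb : Nat),
    s.length - i ≤ k → s.length - i ≤ fa → s.length - i ≤ fb →
    s.length ≠ 1 → st.length = s.length →
    (∀ j, i ≤ j + 1 → j < st.length → st.getD j 0 = (pvInit s).getD j 0) →
    pvALoop st i fa = pvBLoop s i (pvSumPos st) fb := by
  intro k
  induction k with
  | zero =>
    intro i st fa fb hk hfa hfb hn hlen hinv
    rw [pv_aloop_out _ _ _ (by omega), pv_bloop_out _ _ _ _ (by omega)]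
  | succ k ih =>
    intro i st fa fb hk hfa hfb hn hlen hinv
    by_cases hi : i < s.length
    · have hist : i < st.length := by omega
      obtain ⟨fa1, rfl⟩ : ∃ m, fa = m + 1 := ⟨fa - 1, by omega⟩
      obtain ⟨fb1, rfl⟩ : ∃ m, fb = m + 1 := ⟨fb - 1, by omega⟩
      rw [pvALoop, if_pos hist, pvBLoop, if_pos hi]
      have hii : st.getD i 0 = (pvInit s).getD i 0 := hinv i (by omega) hist
      rw [pv_getD_init s i hi] at hii
      by_cases hdot : s.getD i ' ' = '.'
      · rw [if_neg (by rw [hii, if_pos hdot]; decide), if_pos hdot]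
        exact ih (i+1) st fa1 fb1 (by omega) (by omega) (by omega) hn hlen
          (fun j hj hjl => hinv j (by omega) hjl)
      · rw [if_pos (by rw [hii, if_neg hdot]), if_neg hdot]
        by_cases h0 : i = 0
        · subst h0
          rw [if_pos rfl]
          have h1 : (1:Nat) < s.length := by omega
          have e1 : st.getD 1 0 = (pvInit s).getD 1 0 := hinv 1 (by omega) (by omega)
          rw [pv_getD_init s 1 h1] at e1
          by_cases hd1 : s.getD 1 ' ' = '.'
          · rw [if_neg (by rw [e1, if_pos hd1]; decide), if_pos ⟨h1, hd1⟩]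
            exact pv_rightStep s k ih 0 st fa1 fb1 hk (by omega) (by omega) hn hlen hinv h1 hd1
              (by rw [e1, if_pos hd1])
          · rw [if_pos (by rw [e1, if_neg hd1])]
            rw [if_neg (show ¬ ((0:Nat) + 1 < s.length ∧ s.getD (0+1) ' ' = '.') from fun h => hd1 h.2)]
            rw [if_neg (show ¬ (1 ≤ (0:Nat) ∧ s.getD (0-1) ' ' = '.') from fun h => absurd h.1 (by omega))]
        · by_cases hlast : i = st.length - 1
          · rw [if_neg h0, if_pos hlast]
            have him : i - 1 < st.length := by omega
            have em : st.getD (i-1) 0 = (pvInit s).getD (i-1) 0 := hinv (i-1) (by omega) him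
            rw [pv_getD_init s (i-1) (by omega)] at em
            by_cases hdm : s.getD (i-1) ' ' = '.'
            · rw [if_neg (by rw [em, if_pos hdm]; decide)]
              rw [if_neg (show ¬ (i + 1 < s.length ∧ s.getD (i+1) ' ' = '.') from fun h => absurd h.1 (by omega))]
              rw [if_pos ⟨by omega, hdm⟩]
              rw [pv_aloop_out _ _ _ (by simp; omega), pv_bloop_out _ _ _ _ (by omega)]
              exact pv_sumPos_set st (i-1) him (by rw [em, if_pos hdm])
            · rw [if_pos (by rw [em, if_neg hdm])]
              rw [if_neg (show ¬ (i + 1 < s.length ∧ s.getD (i+1) ' ' = '.') from fun h => absurd h.1 (by omega))]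
              rw [if_neg (show ¬ (1 ≤ i ∧ s.getD (i-1) ' ' = '.') from fun h => hdm h.2)]
          · rw [if_neg h0, if_neg hlast]
            have hip : i + 1 < s.length := by omega
            have ep : st.getD (i+1) 0 = (pvInit s).getD (i+1) 0 := hinv (i+1) (by omega) (by omega)
            rw [pv_getD_init s (i+1) hip] at ep
            have em : st.getD (i-1) 0 = (pvInit s).getD (i-1) 0 := hinv (i-1) (by omega) (by omega)
            rw [pv_getD_init s (i-1) (by omega)] at em
            have hcov : ¬ (st.getD (i-1) 0 = 1 ∨ st.getD (i+1) 0 = 1) := by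
              rw [em, ep]; split <;> split <;> decide
            rw [if_neg hcov]
            by_cases hdp : s.getD (i+1) ' ' = '.'
            · rw [if_neg (by rw [ep, if_pos hdp]; decide), if_pos ⟨hip, hdp⟩]
              exact pv_rightStep s k ih i st fa1 fb1 hk (by omega) (by omega) hn hlen hinv hip hdp
                (by rw [ep, if_pos hdp])
            · rw [if_pos (by rw [ep, if_neg hdp])]
              rw [if_neg (show ¬ (i + 1 < s.length ∧ s.getD (i+1) ' ' = '.') from fun h => hdp h.2)]
              by_cases hdm : s.getD (i-1) ' ' = '.'
              · rw [if_neg (by rw [em, if_pos hdm]; decide), if_pos ⟨by omega, hdm⟩]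
                have hinv1 : ∀ j, i + 1 ≤ j + 1 → j < (st.set (i-1) 1).length → (st.set (i-1) 1).getD j 0 = (pvInit s).getD j 0 := by
                  intro j hj hjl
                  have hjl' : j < st.length := by simpa using hjl
                  rw [pv_getD_set, if_neg (fun h => by omega)]
                  exact hinv j (by omega) hjl'
                rw [ih (i+1) (st.set (i-1) 1) fa1 fb1 (by omega) (by omega) (by omega) hn (by simp; omega) hinv1,
                    pv_sumPos_set st (i-1) (by omega) (by rw [em, if_pos hdm])]
              · rw [if_pos (by rw [em, if_neg hdm])]
                rw [if_neg (show ¬ (1 ≤ i ∧ s.getD (i-1) ' ' = '.') from fun h => hdm h.2)]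
    · rw [pv_aloop_out _ _ _ (by omega), pv_bloop_out _ _ _ _ (by omega)]

-- ===== VERDICT (by name: the statement is the Claim_ definition above) =====
theorem minimumBuckets_spec : Claim_equal_minimumBuckets := by
  unfold Claim_equal_minimumBuckets Spec_minimumBuckets minimumBuckets minimumBuckets_alt pvMain
  intro street _
  by_cases h1 : (pvInit street.toList).length = 1
  · rw [if_pos h1]
    have hs : street.toList.length = 1 := by simpa [pvInit] using h1
    obtain ⟨c, hc⟩ := List.length_eq_one_iff.mp hs
    rw [hc]
    by_cases hcd : c = '.'
    · subst hcd
      rw [if_pos (by rw [pv_getD_init _ 0 (by simp)]; simp)]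
      decide
    · rw [if_neg (by rw [pv_getD_init _ 0 (by simp)]; simp [hcd])]
      rw [show ([c] : List Char).length = 0 + 1 from rfl, pvBLoop, if_pos (by simp)]
      rw [if_neg (by simp [hcd]), if_neg (by simp), if_neg (by simp)]
  · rw [if_neg h1]
    have hlen : (pvInit street.toList).length = street.toList.length := by simp [pvInit]
    rw [hlen, pv_loop_eq street.toList street.toList.length 0 (pvInit street.toList)
        street.toList.length street.toList.length
        (by omega) (by omega) (by omega) (by omega) hlen (fun j _ _ => rfl), pv_sumPos_init]
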